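-- pv_equiv track=rewrite | github.com/ihorivliev/Tests | E11.py | compute_reachable
-- ===== SOURCE A (Python) =====
-- def compute_reachable(step_map, start, max_n):
--     """
--     Given a step_map (tuple of length 3) and start node,
--     compute reachable nodes at each depth up to max_n.
--     Returns a dict: depth -> set of reachable nodes.
--     """
--     reachable = {0: {start}}
--     for n in range(1, max_n + 1):
--         prev = reachable[n - 1]
--         curr = set()
--         for node in prev:
--             curr.add(step_map[node])
--         reachable[n] = curr
--     return reachable
-- ===== SOURCE B (Python) =====
-- def compute_reachable(step_map, start, max_n):
--     """Same result as A: since step_map is deterministic, every reachable set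
--     is a singleton, so track one current node instead of a set."""
--     reachable = {0: {start}}
--     cur = start
--     for n in range(1, max_n + 1):
--         cur = step_map[cur]
--         reachable[n] = {cur}
--     return reachable
-- ===== Notes on version B (the rewrite author's own statement) =====
-- stated objective: simpler
-- what changed: B exploits that the step map is deterministic, so each depth's reachable set is a singleton: it tracks a single current node and drops A's per-depth set construction (the inner loop over the previous set and the dict lookup of the previous depth disappear).
import Mathlib
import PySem

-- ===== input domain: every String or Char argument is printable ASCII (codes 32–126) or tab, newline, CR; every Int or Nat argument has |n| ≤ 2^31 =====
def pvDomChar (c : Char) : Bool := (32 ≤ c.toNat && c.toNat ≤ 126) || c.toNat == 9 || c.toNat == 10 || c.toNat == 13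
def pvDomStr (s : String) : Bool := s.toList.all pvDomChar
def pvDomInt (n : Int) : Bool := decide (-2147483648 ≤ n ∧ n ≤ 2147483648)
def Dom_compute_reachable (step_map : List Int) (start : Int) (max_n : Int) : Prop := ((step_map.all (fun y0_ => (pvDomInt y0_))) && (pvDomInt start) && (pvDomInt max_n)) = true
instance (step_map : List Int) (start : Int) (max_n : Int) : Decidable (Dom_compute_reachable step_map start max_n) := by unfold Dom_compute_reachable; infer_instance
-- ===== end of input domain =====

-- B tracks a single current node instead of per-depth singleton sets (simpler; same cost).


-- ===== PORT A =====
-- A: reachable = {0: {start}}; for n in range(1, max_n+1): prev = reachable[n-1];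
--    curr = set(); for node in prev: curr.add(step_map[node]); reachable[n] = curr.
-- step_map[node] → (pyGet? …).getD 0: the .getD 0 is reached only on IndexError inputs,
-- which Pre_ excludes.  reachable[n-1] → Dict.getD … []: the key n-1 is always present.
-- The sets traversed here are singletons, so Python's set-iteration order cannot matter.
def compute_reachable (step_map : List Int) (start : Int) (max_n : Int) : List (Int × List Int) :=
  let init : PySem.Dict Int (List Int) := PySem.Dict.ofList [(0, PySem.Set.ofList [start])]
  let reachable := (PySem.List.pyRange 1 (max_n + 1) 1).foldl
    (fun (d : PySem.Dict Int (List Int)) n =>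
      let prev := d.getD (n - 1) []
      let curr := prev.foldl
        (fun (c : PySem.Set Int) node => PySem.Set.add c ((PySem.List.pyGet? step_map node).getD 0))
        PySem.Set.empty
      d.insert n curr) init
  reachable.items

-- ===== PORT B =====
-- B: reachable = {0: {start}}; cur = start; for n: cur = step_map[cur]; reachable[n] = {cur}.
-- The dict keys 0,1,2,… are fresh and increasing, so the dict IS its items list: B keeps it
-- directly as the association list and appends.
def compute_reachable_alt (step_map : List Int) (start : Int) (max_n : Int) : List (Int × List Int) :=
  let st := (PySem.List.pyRange 1 (max_n + 1) 1).foldl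
    (fun (p : List (Int × List Int) × Int) n =>
      let cur := (PySem.List.pyGet? step_map p.2).getD 0
      (p.1 ++ [(n, [cur])], cur))
    ([(0, [start])], start)
  st.1

-- ===== PRECONDITION & SPEC =====
-- Pre_: exactly the inputs on which Python A raises no IndexError, i.e. each of the
-- max_n indexings along the orbit start, step_map[start], … hits a valid index.
def pvOrbitOk (step_map : List Int) : Int → Nat → Bool
  | _, 0 => true
  | cur, k + 1 =>
    match PySem.List.pyGet? step_map cur with
    | none => false
    | some v => pvOrbitOk step_map v k

def Pre_compute_reachable (step_map : List Int) (start : Int) (max_n : Int) : Prop :=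
  pvOrbitOk step_map start max_n.toNat = true
instance (step_map : List Int) (start : Int) (max_n : Int) : Decidable (Pre_compute_reachable step_map start max_n) := by unfold Pre_compute_reachable; infer_instance

def pvWitness_compute_reachable : List Int × Int × Int := ([1, 0], 0, 3)

def Spec_compute_reachable (step_map : List Int) (start : Int) (max_n : Int) (out : List (Int × List Int)) : Prop := out = compute_reachable_alt step_map start max_n
instance (step_map : List Int) (start : Int) (max_n : Int) (out : List (Int × List Int)) : Decidable (Spec_compute_reachable step_map start max_n out) := by unfold Spec_compute_reachable; infer_instance

-- ===== CLAIM (what is proved, stated in full; the proofs are below) =====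
def Claim_equal_compute_reachable : Prop := ∀ (step_map : List Int) (start : Int) (max_n : Int), Dom_compute_reachable step_map start max_n → Pre_compute_reachable step_map start max_n → Spec_compute_reachable step_map start max_n (compute_reachable step_map start max_n)

-- ===== LEMMAS AND PROOFS =====

-- A's loop body and B's loop body.
def stepA (step_map : List Int) (d : PySem.Dict Int (List Int)) (n : Int) : PySem.Dict Int (List Int) :=
  let prev := d.getD (n - 1) []
  let curr := prev.foldl
    (fun (c : PySem.Set Int) node => PySem.Set.add c ((PySem.List.pyGet? step_map node).getD 0))
    PySem.Set.empty
  d.insert n curr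

def stepB (step_map : List Int) (p : List (Int × List Int) × Int) (n : Int) : List (Int × List Int) × Int :=
  let cur := (PySem.List.pyGet? step_map p.2).getD 0
  (p.1 ++ [(n, [cur])], cur)

-- Looking up the freshly appended last key of an association list.
theorem get?_mk_append_last (acc : List (Int × List Int)) (a : Int) (v : List Int)
    (h : ∀ p ∈ acc, p.1 ≠ a) :
    (PySem.Dict.mk (acc ++ [(a, v)])).get? a = some v := by
  induction acc with
  | nil => simp [PySem.Dict.get?_mk_cons]
  | cons q t ih =>
    obtain ⟨qk, qv⟩ := q
    have hq : (qk == a) = false := by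
      have := h (qk, qv) (by simp)
      simpa using this
    simp only [List.cons_append, PySem.Dict.get?_mk_cons, hq]
    exact ih (fun p hp => h p (by simp [hp]))

-- Core invariant: A's dict state IS B's accumulator list; all keys so far are < a and the
-- key a-1 is bound to the singleton [cur], B's current node.
theorem loop_eq (step_map : List Int) : ∀ (fuel : Nat) (a : Int) (acc : List (Int × List Int)) (cur : Int),
    (∀ p ∈ acc, p.1 < a) →
    (PySem.Dict.mk acc).get? (a - 1) = some [cur] →
    ((PySem.List.pyRange a (a + fuel) 1).foldl (stepA step_map) (PySem.Dict.mk acc)).items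
      = ((PySem.List.pyRange a (a + fuel) 1).foldl (stepB step_map) (acc, cur)).1 := by
  intro fuel
  induction fuel with
  | zero =>
    intro a acc cur _ _
    rw [PySem.List.pyRange_one_eq_nil (by omega)]
    rfl
  | succ k ih =>
    intro a acc cur hlt hget
    rw [PySem.List.pyRange_one_cons (by omega : a < a + (k + 1 : Nat))]
    simp only [List.foldl_cons]
    have hnc : (PySem.Dict.mk acc).contains a = false := by
      rw [PySem.Dict.contains_eq_decide_mem_keys]
      simp only [decide_eq_false_iff_not, PySem.Dict.keys]
      intro hmem
      obtain ⟨p, hp, hpa⟩ := List.mem_map.mp hmem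
      have := hlt p hp
      omega
    have hA : stepA step_map (PySem.Dict.mk acc) a
        = PySem.Dict.mk (acc ++ [(a, [(PySem.List.pyGet? step_map cur).getD 0])]) := by
      unfold stepA
      have hprev : (PySem.Dict.mk acc).getD (a - 1) [] = [cur] := by
        rw [PySem.Dict.getD_eq_get?_getD, hget]
        rfl
      rw [hprev]
      apply PySem.Dict.ext
      rw [PySem.Dict.items_insert]
      rw [hnc]
      simp [PySem.Set.add, PySem.Set.empty, PySem.Set.contains]
    have hB : stepB step_map (acc, cur) a
        = (acc ++ [(a, [(PySem.List.pyGet? step_map cur).getD 0])],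
           (PySem.List.pyGet? step_map cur).getD 0) := rfl
    rw [hA, hB]
    have hrange : a + (k + 1 : Nat) = (a + 1) + (k : Nat) := by push_cast; ring
    rw [hrange]
    apply ih
    · intro p hp
      rcases List.mem_append.mp hp with h | h
      · have := hlt _ h; omega
      · rw [List.mem_singleton] at h
        subst h
        exact lt_add_one a
    · have h1 : ((a + 1 : Int) - 1) = a := by ring
      rw [h1]
      exact get?_mk_append_last acc a _ (fun p hp => by have := hlt p hp; omega)

-- ===== VERDICT (by name: the statement is the Claim_ definition above) =====
theorem compute_reachable_spec : Claim_equal_compute_reachable := by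
  unfold Claim_equal_compute_reachable Spec_compute_reachable
  intro step_map start max_n _ _
  unfold compute_reachable compute_reachable_alt
  simp only []
  by_cases h : max_n + 1 ≤ 1
  · rw [PySem.List.pyRange_one_eq_nil h]
    simp [PySem.Dict.ofList, PySem.Dict.update, PySem.Set.ofList, PySem.Set.add,
      PySem.Set.empty, PySem.Set.contains, PySem.Dict.insert, PySem.Dict.contains,
      PySem.Dict.empty]
  · have h1 : (1 : Int) + (max_n.toNat : Nat) = max_n + 1 := by omega
    have hD : PySem.Dict.ofList [((0 : Int), PySem.Set.ofList [start])]
        = PySem.Dict.mk [((0 : Int), [start])] := by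
      apply PySem.Dict.ext
      simp [PySem.Dict.ofList, PySem.Dict.update, PySem.Set.ofList, PySem.Set.add,
        PySem.Set.empty, PySem.Set.contains, PySem.Dict.insert, PySem.Dict.contains,
        PySem.Dict.empty]
    rw [hD, ← h1]
    exact loop_eq step_map max_n.toNat 1 [((0 : Int), [start])] start
      (by
        intro p hp
        rw [List.mem_singleton] at hp
        subst hp
        exact Int.zero_lt_one)
      (by simp [PySem.Dict.get?])
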